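-- pv_equiv track=rewrite | github.com/mubaihe25/FedVLR-copy | scripts/run_experiment_batch.py | sanitize_token
-- ===== SOURCE A (Python) =====
-- from typing import Any, Dict, Iterable, List, Optional, Tuple
--
-- def sanitize_token(value: Any) -> str:
--     text = str(value).strip()
--     text = text.replace("\\", "_").replace("/", "_").replace(" ", "_")
--     for old, new in {
--         ".": "p",
--         "-": "m",
--         "+": "",
--         "=": "-",
--         ":": "-",
--         ",": "_",
--         "[": "",
--         "]": "",
--         "{": "",
--         "}": "",
--         "'": "",
--         '"': "",
--     }.items():
--         text = text.replace(old, new)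
--     return "".join(char if char.isalnum() or char in {"_", "-"} else "_" for char in text) or "value"
-- ===== SOURCE B (Python) =====
-- # B: one pass over the stripped string using a precomputed net substitution map
-- # (simpler decomposition; same return value as A's chain of replace passes).
-- _M = {"\\": "_", "/": "_", " ": "_", ",": "_", ".": "p", "-": "m",
--       "=": "-", ":": "-", "+": "", "[": "", "]": "", "{": "", "}": "",
--       "'": "", '"': ""}
--
-- def sanitize_token(value):
--     text = str(value).strip()
--     return "".join(
--         _M[c] if c in _M else (c if c.isalnum() or c in "_-" else "_")
--         for c in text
--     ) or "value"
-- ===== Notes on version B (the rewrite author's own statement) =====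
-- stated objective: simpler
-- what changed: Replaces A's 14 sequential whole-string replace passes plus a final filtering join by a single pass: one precomputed substitution dict capturing the net per-character effect, applied in one comprehension over the stripped string.
import Mathlib
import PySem

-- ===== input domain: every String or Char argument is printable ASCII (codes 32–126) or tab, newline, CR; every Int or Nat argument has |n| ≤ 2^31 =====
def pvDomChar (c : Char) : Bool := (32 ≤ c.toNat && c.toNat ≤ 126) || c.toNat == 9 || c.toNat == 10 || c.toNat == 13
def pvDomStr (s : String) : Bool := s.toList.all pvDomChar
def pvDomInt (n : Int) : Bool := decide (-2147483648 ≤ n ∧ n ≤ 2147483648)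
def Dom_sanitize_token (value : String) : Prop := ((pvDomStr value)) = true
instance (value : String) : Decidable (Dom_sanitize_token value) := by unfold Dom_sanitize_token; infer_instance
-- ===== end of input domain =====

-- B collapses A's 14 sequential replace passes into one single-pass substitution map; same return value.

-- ===== PORT A =====
def sanitize_token (value : String) : String :=
  let text := PySem.Str.strip value
  let text := PySem.Str.replace (PySem.Str.replace (PySem.Str.replace text "\\" "_") "/" "_") " " "_"
  let text := PySem.Str.replace text "." "p"
  let text := PySem.Str.replace text "-" "m"
  let text := PySem.Str.replace text "+" ""
  let text := PySem.Str.replace text "=" "-"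
  let text := PySem.Str.replace text ":" "-"
  let text := PySem.Str.replace text "," "_"
  let text := PySem.Str.replace text "[" ""
  let text := PySem.Str.replace text "]" ""
  let text := PySem.Str.replace text "{" ""
  let text := PySem.Str.replace text "}" ""
  let text := PySem.Str.replace text "'" ""
  let text := PySem.Str.replace text "\"" ""
  let joined := PySem.Str.join "" (text.toList.map (fun ch =>
    if PySem.Chars.isalnum ch || (ch == '_' || ch == '-') then String.ofList [ch] else "_"))
  if joined = "" then "value" else joined

-- ===== PORT B =====
def pvSubMap : PySem.Dict Char String := PySem.Dict.mk
  [('\\', "_"), ('/', "_"), (' ', "_"), (',', "_"), ('.', "p"), ('-', "m"),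
   ('=', "-"), (':', "-"), ('+', ""), ('[', ""), (']', ""), ('{', ""), ('}', ""),
   ('\'', ""), ('"', "")]

def sanitize_token_alt (value : String) : String :=
  let text := PySem.Str.strip value
  let joined := PySem.Str.join "" (text.toList.map (fun c =>
    match pvSubMap.get? c with
    | some s => s
    | none => if PySem.Chars.isalnum c || (c == '_' || c == '-') then String.ofList [c] else "_"))
  if joined = "" then "value" else joined

-- ===== PRECONDITION & SPEC =====
def Spec_sanitize_token (value : String) (out : String) : Prop := out = sanitize_token_alt value
instance (value : String) (out : String) : Decidable (Spec_sanitize_token value out) := by unfold Spec_sanitize_token; infer_instance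

-- ===== CLAIM (what is proved, stated in full; the proofs are below) =====
def Claim_equal_sanitize_token : Prop := ∀ (value : String), Dom_sanitize_token value → Spec_sanitize_token value (sanitize_token value)

-- ===== LEMMAS AND PROOFS =====


-- replace with a single-character pattern acts independently on each character
theorem pv_replace_go_single (a : Char) (r : List Char) :
    ∀ (l acc : List Char), PySem.Chars.replace.go [a] r l.length l acc
      = acc.reverse ++ l.flatMap (fun c => if c == a then r else [c]) := by
  intro l
  induction l with
  | nil => intro acc; simp [PySem.Chars.replace.go]
  | cons c t ih =>
    intro acc
    rw [List.length_cons, PySem.Chars.replace.go]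
    by_cases hc : c = a
    · subst hc
      simp [List.isPrefixOf, ih]
    · have : ([a].isPrefixOf (c :: t)) = false := by
        simp [List.isPrefixOf, Ne.symm hc]
      simp [this, ih, hc]

theorem pv_replace_single (a : Char) (r cs : List Char) :
    PySem.Chars.replace cs [a] r = cs.flatMap (fun c => if c == a then r else [c]) := by
  have h := pv_replace_go_single a r cs []
  simp only [PySem.Chars.replace, List.isEmpty_cons]
  simpa using h

theorem pv_join_nil_flatten (ls : List (List Char)) : PySem.Chars.join [] ls = ls.flatten := by
  simp only [PySem.Chars.join, List.intercalate]
  induction ls with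
  | nil => rfl
  | cons h t ih => cases t <;> simp_all [List.intersperse]

theorem pv_flatMap_ext {l : List Char} {f g : Char → List Char} (h : ∀ c, f c = g c) :
    l.flatMap f = l.flatMap g := by
  exact congrArg l.flatMap (funext h)

theorem pv_if_empty_congr (a b : String) (h : a = b) :
    (if a = "" then "value" else a) = (if b = "" then "value" else b) := by rw [h]

-- ===== VERDICT (by name: the statement is the Claim_ definition above) =====
set_option maxHeartbeats 2000000 in
theorem sanitize_token_spec : Claim_equal_sanitize_token := by
  intro value _
  unfold Spec_sanitize_token sanitize_token sanitize_token_alt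
  dsimp only []
  apply pv_if_empty_congr
  rw [← String.toList_inj]
  have t0 : ("\\" : String).toList = ['\\'] := rfl
  have t1 : ("/" : String).toList = ['/'] := rfl
  have t2 : (" " : String).toList = [' '] := rfl
  have t3 : ("." : String).toList = ['.'] := rfl
  have t4 : ("-" : String).toList = ['-'] := rfl
  have t5 : ("+" : String).toList = ['+'] := rfl
  have t6 : ("=" : String).toList = ['='] := rfl
  have t7 : (":" : String).toList = [':'] := rfl
  have t8 : ("," : String).toList = [','] := rfl
  have t9 : ("[" : String).toList = ['['] := rfl
  have t10 : ("]" : String).toList = [']'] := rfl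
  have t11 : ("{" : String).toList = ['{'] := rfl
  have t12 : ("}" : String).toList = ['}'] := rfl
  have t13 : ("'" : String).toList = ['\''] := rfl
  have t14 : ("\"" : String).toList = ['\"'] := rfl
  have t15 : ("_" : String).toList = ['_'] := rfl
  have t16 : ("p" : String).toList = ['p'] := rfl
  have t17 : ("m" : String).toList = ['m'] := rfl
  have t18 : ("" : String).toList = [] := rfl
  simp only [PySem.Str.toList_join, List.map_map, pv_join_nil_flatten,
    ← List.flatMap_def, PySem.Str.toList_replace, t0, t1, t2, t3, t4, t5, t6, t7, t8, t9,
    t10, t11, t12, t13, t14, t15, t16, t17, t18, pv_replace_single, List.flatMap_assoc,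
    Function.comp_def]
  apply pv_flatMap_ext
  intro c
  by_cases h0 : c = '\\'
  · subst h0; decide
  by_cases h1 : c = '/'
  · subst h1; decide
  by_cases h2 : c = ' '
  · subst h2; decide
  by_cases h3 : c = ','
  · subst h3; decide
  by_cases h4 : c = '.'
  · subst h4; decide
  by_cases h5 : c = '-'
  · subst h5; decide
  by_cases h6 : c = '='
  · subst h6; decide
  by_cases h7 : c = ':'
  · subst h7; decide
  by_cases h8 : c = '+'
  · subst h8; decide
  by_cases h9 : c = '['
  · subst h9; decide
  by_cases h10 : c = ']'
  · subst h10; decide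
  by_cases h11 : c = '{'
  · subst h11; decide
  by_cases h12 : c = '}'
  · subst h12; decide
  by_cases h13 : c = '\''
  · subst h13; decide
  by_cases h14 : c = '\"'
  · subst h14; decide
  simp [pvSubMap, PySem.Dict.get?, h0, Ne.symm h0, h1, Ne.symm h1, h2, Ne.symm h2, h3, Ne.symm h3, h4, Ne.symm h4, h5, Ne.symm h5, h6, Ne.symm h6, h7, Ne.symm h7, h8, Ne.symm h8, h9, Ne.symm h9, h10, Ne.symm h10, h11, Ne.symm h11, h12, Ne.symm h12, h13, Ne.symm h13, h14, Ne.symm h14]
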